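-- pv_equiv track=rewrite | github.com/Galher/python-course-assignments | Day09/dna_sequencing_doctest.py | clean_sequence
-- ===== SOURCE A (Python) =====
-- dna_nucleotides = {'A', 'C', 'G', 'T'}
--
-- def clean_sequence(sequence):
--     """
--     Cleans a DNA sequence by keeping only valid nucleotides (A, C, G, T)
--     from the start until the first invalid character.
--
--     Args:
--         sequence (str): The DNA sequence string to clean.
--
--     Returns:
--         str: The cleaned DNA sequence up to the first invalid nucleotide.
--
--     Examples:
--     >>> clean_sequence("ACGTAGT")
--     'ACGTAGT'
--     >>> clean_sequence("ACGTBXZ")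
--     'ACGT'
--     >>> clean_sequence("XYZ")
--     ''
--     >>> clean_sequence("")
--     ''
--     """
--     clean = ""
--     for nucleotide in sequence:
--         if nucleotide in dna_nucleotides:
--             clean += nucleotide
--         else:
--             break
--     return clean
-- ===== SOURCE B (Python) =====
-- import re
--
-- def clean_sequence(sequence):
--     return re.match(r'[ACGT]*', sequence).group()
-- ===== Notes on version B (the rewrite author's own statement) =====
-- stated objective: idiomatic
-- what changed: The explicit loop with break and string accumulator is replaced by a single regex prefix match re.match(r'[ACGT]*', sequence).group(), which yields the longest valid-nucleotide prefix directly.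
import Mathlib
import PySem

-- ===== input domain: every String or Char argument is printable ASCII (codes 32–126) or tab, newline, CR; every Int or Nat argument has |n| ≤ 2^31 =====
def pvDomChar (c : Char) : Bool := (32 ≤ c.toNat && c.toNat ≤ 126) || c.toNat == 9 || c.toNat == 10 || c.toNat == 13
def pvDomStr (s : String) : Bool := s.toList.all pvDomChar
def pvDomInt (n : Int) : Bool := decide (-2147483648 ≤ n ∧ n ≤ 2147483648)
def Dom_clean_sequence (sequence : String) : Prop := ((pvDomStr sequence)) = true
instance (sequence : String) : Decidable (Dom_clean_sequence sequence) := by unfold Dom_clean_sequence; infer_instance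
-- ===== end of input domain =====

-- B replaces A's explicit loop/break/accumulator with a regex prefix match (here: takeWhile of the valid-char test); objective: idiomatic.

-- ===== PORT A =====
-- module constant: dna_nucleotides = {'A', 'C', 'G', 'T'}  (a Python set of chars)
def dna_nucleotides : PySem.Set Char := PySem.Set.ofList ['A', 'C', 'G', 'T']

-- the for-loop with break: recursion over the remaining chars carrying the accumulator `clean`
def cleanLoopA : List Char → String → String
  | [], clean => clean
  | c :: rest, clean =>
      if c ∈ dna_nucleotides then cleanLoopA rest (clean.push c) else clean

def clean_sequence (sequence : String) : String :=
  cleanLoopA sequence.toList ""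

-- ===== PORT B =====
-- re.match(r'[ACGT]*', sequence).group(): the longest prefix of chars in ACGT
def clean_sequence_alt (sequence : String) : String :=
  String.ofList (sequence.toList.takeWhile (fun c => c ∈ ['A', 'C', 'G', 'T']))

-- ===== PRECONDITION & SPEC =====
def Spec_clean_sequence (sequence : String) (out : String) : Prop := out = clean_sequence_alt sequence
instance (sequence : String) (out : String) : Decidable (Spec_clean_sequence sequence out) := by unfold Spec_clean_sequence; infer_instance

-- ===== CLAIM (what is proved, stated in full; the proofs are below) =====
def Claim_equal_clean_sequence : Prop := ∀ (sequence : String), Dom_clean_sequence sequence → Spec_clean_sequence sequence (clean_sequence sequence)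

-- ===== LEMMAS AND PROOFS =====
theorem mem_dna_iff (c : Char) : (c ∈ dna_nucleotides) ↔ (c ∈ ['A', 'C', 'G', 'T']) := by
  simp [dna_nucleotides, PySem.Set.mem_ofList]

theorem cleanLoopA_eq (l : List Char) (acc : String) :
    cleanLoopA l acc = acc ++ String.ofList (l.takeWhile (fun c => c ∈ ['A', 'C', 'G', 'T'])) := by
  induction l generalizing acc with
  | nil =>
      rw [cleanLoopA, ← String.toList_inj]
      simp
  | cons c rest ih =>
      by_cases h : (c ∈ ['A', 'C', 'G', 'T'])
      · rw [cleanLoopA, if_pos ((mem_dna_iff c).mpr h), ih, ← String.toList_inj]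
        simp only [List.mem_cons, List.not_mem_nil, or_false] at h
        simp [List.takeWhile_cons]
        tauto
      · rw [cleanLoopA, if_neg (fun hc => h ((mem_dna_iff c).mp hc)), ← String.toList_inj]
        simp only [List.mem_cons, List.not_mem_nil, or_false] at h
        simp [List.takeWhile_cons]
        tauto

-- ===== VERDICT (by name: the statement is the Claim_ definition above) =====
theorem clean_sequence_spec : Claim_equal_clean_sequence := by
  intro s _
  unfold Spec_clean_sequence clean_sequence clean_sequence_alt
  rw [cleanLoopA_eq]
  simp
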